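-- pv_equiv track=rewrite | github.com/mariamadrid19/pogonus-phd | annotation/functional/08_minimal_annotated_gtf.py | format_gtf_attributes
-- ===== SOURCE A (Python) =====
-- def format_gtf_attributes(attrs):
--     preferred = [
--         "gene_id",
--         "transcript_id",
--         "gene_name",
--         "product",
--         "annotation_confidence",
--     ]
--     ordered = []
--     seen = set()
--
--     for k in preferred:
--         if k in attrs and attrs[k] != "":
--             ordered.append(k)
--             seen.add(k)
--
--     for k in attrs:
--         if k not in seen and attrs[k] != "":
--             ordered.append(k)
--
--     return " ".join(f'{k} "{attrs[k]}";' for k in ordered)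
-- ===== SOURCE B (Python) =====
-- def format_gtf_attributes(attrs):
--     preferred = [
--         "gene_id",
--         "transcript_id",
--         "gene_name",
--         "product",
--         "annotation_confidence",
--     ]
--     rank = {k: i for i, k in enumerate(preferred)}
--     keys = sorted((k for k in attrs if attrs[k] != ""),
--                   key=lambda k: rank.get(k, len(preferred)))
--     return " ".join(f'{k} "{attrs[k]}";' for k in keys)
-- ===== Notes on version B (the rewrite author's own statement) =====
-- stated objective: alternative
-- what changed: A's two explicit scans (a preferred-keys loop that also fills a seen set, then a dedup loop over the dict) are replaced by a non-empty-value filter followed by one stable sort under a rank key (index in the preferred list, else a constant tie rank that preserves insertion order).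
import Mathlib
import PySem

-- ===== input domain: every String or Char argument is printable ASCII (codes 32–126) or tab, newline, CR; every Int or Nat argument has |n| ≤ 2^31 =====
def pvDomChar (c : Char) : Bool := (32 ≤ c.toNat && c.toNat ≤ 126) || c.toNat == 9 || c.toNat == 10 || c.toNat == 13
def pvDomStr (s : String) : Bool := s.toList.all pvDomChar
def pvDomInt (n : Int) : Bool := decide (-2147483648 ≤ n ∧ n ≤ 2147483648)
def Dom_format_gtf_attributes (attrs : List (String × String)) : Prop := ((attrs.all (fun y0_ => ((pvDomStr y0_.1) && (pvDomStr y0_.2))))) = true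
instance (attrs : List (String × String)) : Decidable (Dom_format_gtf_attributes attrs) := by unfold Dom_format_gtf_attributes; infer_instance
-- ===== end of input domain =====

-- B replaces A's two scans (preferred-first loop plus seen-set dedup loop) by a filter and
-- one stable sort under a rank key (alternative decomposition; same cost, no speed claim).


-- ===== PORT A =====
def pvItem (k v : String) : String :=
  String.ofList (k.toList ++ [' ', '"'] ++ v.toList ++ ['"', ';'])

def format_gtf_attributes (attrs : List (String × String)) : String :=
  let preferred : List String :=
    ["gene_id", "transcript_id", "gene_name", "product", "annotation_confidence"]
  let d : PySem.Dict String String := PySem.Dict.mk attrs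
  let st := preferred.foldl
    (fun (st : List String × PySem.Set String) k =>
      if d.contains k ∧ d.getD k "" ≠ "" then (st.1 ++ [k], PySem.Set.add st.2 k) else st)
    ([], PySem.Set.empty)
  let ordered := (attrs.map Prod.fst).foldl
    (fun o k => if ¬ (PySem.Set.contains st.2 k = true) ∧ d.getD k "" ≠ "" then o ++ [k] else o)
    st.1
  PySem.Str.join " " (ordered.map (fun k => pvItem k (d.getD k "")))

def format_gtf_attributes_alt (attrs : List (String × String)) : String :=
  let preferred : List String :=
    ["gene_id", "transcript_id", "gene_name", "product", "annotation_confidence"]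
  let rank : PySem.Dict String Int :=
    (PySem.List.enumerate preferred).foldl (fun d p => d.insert p.2 p.1) PySem.Dict.empty
  let d : PySem.Dict String String := PySem.Dict.mk attrs
  let keys := PySem.List.sorted
    ((attrs.map Prod.fst).filter (fun k => d.getD k "" != ""))
    (fun k => rank.getD k (preferred.length : Int)) false
  PySem.Str.join " " (keys.map (fun k => pvItem k (d.getD k "")))

-- the rank key of B, characterised


-- ===== PRECONDITION & SPEC =====
-- attrs ports a Python dict, whose keys are unique: Pre_ excludes association lists with
-- duplicate keys, which represent no dict input of the Python programs.
def Pre_format_gtf_attributes (attrs : List (String × String)) : Prop :=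
  (attrs.map Prod.fst).Nodup
instance (attrs : List (String × String)) : Decidable (Pre_format_gtf_attributes attrs) := by
  unfold Pre_format_gtf_attributes; infer_instance

def pvWitness_format_gtf_attributes : (List (String × String)) :=
  [("note", "hyp"), ("gene_id", "g1"), ("product", "")]

def Spec_format_gtf_attributes (attrs : List (String × String)) (out : String) : Prop :=
  out = format_gtf_attributes_alt attrs
instance (attrs : List (String × String)) (out : String) :
    Decidable (Spec_format_gtf_attributes attrs out) := by
  unfold Spec_format_gtf_attributes; infer_instance

-- ===== CLAIM (what is proved, stated in full; the proofs are below) =====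
def Claim_equal_format_gtf_attributes : Prop :=
  ∀ (attrs : List (String × String)), Dom_format_gtf_attributes attrs →
    Pre_format_gtf_attributes attrs →
    Spec_format_gtf_attributes attrs (format_gtf_attributes attrs)

-- ===== LEMMAS AND PROOFS =====
lemma insertBy_append_of_not_before {α : Type} (before : α → α → Bool) (x : α)
    (A B : List α) (h : ∀ a ∈ A, before x a = false) :
    PySem.List.insertBy before x (A ++ B) = A ++ PySem.List.insertBy before x B := by
  induction A with
  | nil => rfl
  | cons a A ih =>
    simp only [List.cons_append, PySem.List.insertBy, h a (by simp)]
    simp only [Bool.false_eq_true, if_false, List.cons.injEq, true_and]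
    exact ih (fun a ha => h a (by simp [ha]))

lemma insertBy_eq_cons_of_before {α : Type} (before : α → α → Bool) (x : α)
    (L : List α) (h : ∀ a ∈ L, before x a = true) :
    PySem.List.insertBy before x L = x :: L := by
  cases L with
  | nil => rfl
  | cons a L => simp [PySem.List.insertBy, h a (by simp)]

lemma insertBy_buckets {α : Type} (key : α → Int) (x : α) (f : Int → List α)
    (hf : ∀ r, ∀ y ∈ f r, key y = r) :
    ∀ ranks : List Int, ranks.Pairwise (· < ·) → key x ∈ ranks →
      PySem.List.insertBy (fun a b => decide (key a < key b)) x
          (ranks.flatMap f)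
        = ranks.flatMap (fun r => f r ++ if key x = r then [x] else []) := by
  intro ranks
  induction ranks with
  | nil => simp
  | cons r rest ih =>
    intro hp hm
    have hrest : ∀ r' ∈ rest, r < r' := (List.pairwise_cons.mp hp).1
    have hxr : r ≤ key x := by
      rcases List.mem_cons.mp hm with hm | hm
      · omega
      · have := hrest _ hm; omega
    have hcross : ∀ y ∈ f r, (fun a b => decide (key a < key b)) x y = false := by
      intro y hy; simp [hf r y hy]; omega
    by_cases hx : key x = r
    · have hall : ∀ y ∈ rest.flatMap f, decide (key x < key y) = true := by
        intro y hy
        rcases List.mem_flatMap.mp hy with ⟨r', hr', hy'⟩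
        have := hrest r' hr'; simp [hf r' y hy']; omega
      have hrest_eq :
          rest.flatMap (fun r' => f r' ++ if key x = r' then [x] else []) = rest.flatMap f := by
        apply List.flatMap_congr
        intro r' hr'
        have := hrest r' hr'
        have : key x ≠ r' := by omega
        simp [this]
      rw [List.flatMap_cons, insertBy_append_of_not_before _ _ _ _ hcross,
          insertBy_eq_cons_of_before _ _ _ hall, List.flatMap_cons, hrest_eq]
      simp [hx]
    · have hm' : key x ∈ rest := by
        rcases List.mem_cons.mp hm with hm | hm
        · exact absurd hm hx
        · exact hm
      rw [List.flatMap_cons, insertBy_append_of_not_before _ _ _ _ hcross,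
          ih (List.pairwise_cons.mp hp).2 hm', List.flatMap_cons]
      simp [hx]

lemma sorted_buckets_aux {α : Type} (key : α → Int) (ranks : List Int)
    (hr : ranks.Pairwise (· < ·)) :
    ∀ (xs processed : List α), (∀ x ∈ xs, key x ∈ ranks) →
      xs.foldl (fun acc x => PySem.List.insertBy (fun a b => decide (key a < key b)) x acc)
          (ranks.flatMap (fun r => processed.filter (fun y => decide (key y = r))))
        = ranks.flatMap (fun r => (processed ++ xs).filter (fun y => decide (key y = r))) := by
  intro xs
  induction xs with
  | nil => intro processed _; simp
  | cons x xs ih =>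
    intro processed hxs
    rw [List.foldl_cons,
        insertBy_buckets key x _ (by intro r y hy; simpa using (List.mem_filter.mp hy).2)
          ranks hr (hxs x (by simp))]
    have heq : (fun r => (processed.filter (fun y => decide (key y = r))) ++ if key x = r then [x] else [])
        = (fun r => (processed ++ [x]).filter (fun y => decide (key y = r))) := by
      funext r
      by_cases h : key x = r <;> simp [List.filter_append, h]
    rw [heq]
    have := ih (processed ++ [x]) (fun y hy => hxs y (by simp [hy]))
    simpa using this

lemma sorted_buckets {α : Type} (key : α → Int) (ranks : List Int)
    (hr : ranks.Pairwise (· < ·)) (xs : List α) (hxs : ∀ x ∈ xs, key x ∈ ranks) :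
    PySem.List.sorted xs key false
      = ranks.flatMap (fun r => xs.filter (fun y => decide (key y = r))) := by
  rw [PySem.List.sorted_eq_foldl_insertBy]
  have := sorted_buckets_aux key ranks hr xs [] hxs
  simp only [List.filter_nil, List.nil_append] at this
  rw [show (ranks.flatMap fun _ => ([] : List α)) = [] by simp] at this
  exact this

-- A's first loop, fst component
lemma pairFold_fst (c : String → Prop) [DecidablePred c] :
    ∀ (ps : List String) (init : List String × PySem.Set String),
    (ps.foldl (fun st k => if c k then (st.1 ++ [k], PySem.Set.add st.2 k) else st) init).1
      = init.1 ++ ps.filter (fun k => decide (c k)) := by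
  intro ps
  induction ps with
  | nil => simp
  | cons p ps ih =>
    intro init
    by_cases h : c p <;> simp [h, ih]

-- A's first loop, seen-set membership
lemma pairFold_snd_mem (c : String → Prop) [DecidablePred c] :
    ∀ (ps : List String) (init : List String × PySem.Set String) (x : String),
    (x ∈ (ps.foldl (fun st k => if c k then (st.1 ++ [k], PySem.Set.add st.2 k) else st) init).2)
      ↔ (x ∈ init.2 ∨ (x ∈ ps ∧ c x)) := by
  intro ps
  induction ps with
  | nil => simp
  | cons p ps ih =>
    intro init x
    by_cases h : c p
    · simp only [List.foldl_cons, if_pos h, ih]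
      rw [PySem.Set.mem_add]
      constructor
      · rintro ((h1 | h1) | h1)
        · exact Or.inl h1
        · exact Or.inr ⟨by simp [h1], by rwa [h1]⟩
        · exact Or.inr ⟨by simp [h1.1], h1.2⟩
      · rintro (h1 | ⟨h1, h2⟩)
        · exact Or.inl (Or.inl h1)
        · rcases List.mem_cons.mp h1 with h1 | h1
          · exact Or.inl (Or.inr h1)
          · exact Or.inr ⟨h1, h2⟩
    · simp only [List.foldl_cons, if_neg h, ih]
      constructor
      · rintro (h1 | ⟨h1, h2⟩)
        · exact Or.inl h1
        · exact Or.inr ⟨by simp [h1], h2⟩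
      · rintro (h1 | ⟨h1, h2⟩)
        · exact Or.inl h1
        · rcases List.mem_cons.mp h1 with h1 | h1
          · exact absurd (h1 ▸ h2) h
          · exact Or.inr ⟨h1, h2⟩

-- A's second loop
lemma foldl_append_if_prop (c : String → Prop) [DecidablePred c] :
    ∀ (l acc : List String),
    l.foldl (fun o k => if c k then o ++ [k] else o) acc = acc ++ l.filter (fun k => decide (c k)) := by
  intro l
  induction l with
  | nil => simp
  | cons x l ih =>
    intro acc
    by_cases h : c x <;> simp [h, ih]

lemma filter_eq_single (l : List String) (hl : l.Nodup) (a : String) :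
    l.filter (fun k => decide (k = a)) = if a ∈ l then [a] else [] := by
  induction l with
  | nil => simp
  | cons x l ih =>
    rcases List.nodup_cons.mp hl with ⟨hx, hl'⟩
    by_cases h : x = a
    · subst h
      simp [ih hl', hx]
    · simp [h, ih hl', Ne.symm h]


def pvRank (k : String) : Int :=
  if k = "gene_id" then 0 else if k = "transcript_id" then 1
  else if k = "gene_name" then 2 else if k = "product" then 3
  else if k = "annotation_confidence" then 4 else 5

lemma rankKey_eq (k : String) :
    (((PySem.List.enumerate ["gene_id", "transcript_id", "gene_name", "product",
        "annotation_confidence"]).foldl (fun d p => d.insert p.2 p.1)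
        PySem.Dict.empty).getD k (5 : Int)) = pvRank k := by
  unfold pvRank
  by_cases h0 : k = "gene_id"
  · subst h0; decide
  by_cases h1 : k = "transcript_id"
  · subst h1; decide
  by_cases h2 : k = "gene_name"
  · subst h2; decide
  by_cases h3 : k = "product"
  · subst h3; decide
  by_cases h4 : k = "annotation_confidence"
  · subst h4; decide
  have e0 : ("gene_id" == k) = false := by simpa using Ne.symm h0
  have e1 : ("transcript_id" == k) = false := by simpa using Ne.symm h1
  have e2 : ("gene_name" == k) = false := by simpa using Ne.symm h2
  have e3 : ("product" == k) = false := by simpa using Ne.symm h3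
  have e4 : ("annotation_confidence" == k) = false := by simpa using Ne.symm h4
  simp [PySem.List.enumerate, PySem.Dict.getD, PySem.Dict.get?, PySem.Dict.insert,
        PySem.Dict.empty, List.find?, e0, e1, e2, e3, e4, h0, h1, h2, h3, h4]

lemma contains_mk_iff (attrs : List (String × String)) (k : String) :
    (PySem.Dict.mk attrs).contains k = true ↔ k ∈ attrs.map Prod.fst := by
  simp [PySem.Dict.contains, List.any_eq_true, List.mem_map]


lemma pvRank_eq_iff (k a : String) (i : Int)
    (h : a ∈ (["gene_id", "transcript_id", "gene_name", "product",
        "annotation_confidence"] : List String)) (hi : pvRank a = i) :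
    pvRank k = i ↔ k = a := by
  constructor
  · intro hk
    by_contra hne
    revert hi hk
    unfold pvRank
    fin_cases h <;> split_ifs <;> simp_all <;> omega
  · intro hk; subst hk; exact hi

lemma pvRank_five_iff (k : String) :
    pvRank k = 5 ↔ k ∉ (["gene_id", "transcript_id", "gene_name", "product",
        "annotation_confidence"] : List String) := by
  unfold pvRank
  split_ifs <;> simp_all

lemma chunk_pref (attrs : List (String × String)) (hnd : (attrs.map Prod.fst).Nodup)
    (a : String) (i : Int) (ha : ∀ k : String, pvRank k = i ↔ k = a) :
    ((attrs.map Prod.fst).filter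
        (fun k => (PySem.Dict.mk attrs).getD k "" != "")).filter
        (fun y => decide (pvRank y = i))
      = if (PySem.Dict.mk attrs).contains a = true ∧ (PySem.Dict.mk attrs).getD a "" ≠ ""
        then [a] else [] := by
  rw [List.filter_congr (fun x _ => decide_eq_decide.mpr (ha x))]
  rw [filter_eq_single _ (hnd.filter _) a]
  by_cases hm : a ∈ (attrs.map Prod.fst).filter (fun k => (PySem.Dict.mk attrs).getD k "" != "")
  · rw [if_pos hm]
    rcases List.mem_filter.mp hm with ⟨h1, h2⟩
    rw [if_pos ⟨(contains_mk_iff attrs a).mpr h1, by simpa using h2⟩]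
  · rw [if_neg hm, if_neg]
    intro ⟨h1, h2⟩
    exact hm (List.mem_filter.mpr ⟨(contains_mk_iff attrs a).mp h1, by simpa using h2⟩)


lemma ports_eq (attrs : List (String × String))
    (hnd : (attrs.map Prod.fst).Nodup) :
    format_gtf_attributes attrs = format_gtf_attributes_alt attrs := by
  simp only [format_gtf_attributes, format_gtf_attributes_alt]
  congr 1
  congr 1
  -- the length cast is 5
  rw [show ((↑(["gene_id", "transcript_id", "gene_name", "product",
      "annotation_confidence"] : List String).length : Int)) = (5 : Int) from by decide]
  -- B's key is pvRank
  simp only [rankKey_eq]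
  -- B's sorted list is the six rank buckets
  rw [sorted_buckets pvRank [0, 1, 2, 3, 4, 5] (by decide) _
    (fun x _ => by unfold pvRank; split_ifs <;> simp)]
  -- A's first loop
  rw [pairFold_fst (fun k => ({ items := attrs } : PySem.Dict String String).contains k = true ∧
      ({ items := attrs } : PySem.Dict String String).getD k "" ≠ "")]
  -- A's second loop
  rw [foldl_append_if_prop]
  -- replace the seen-set condition pointwise on the keys
  have hpt : ∀ x ∈ attrs.map Prod.fst,
      decide (¬(List.foldl (fun st k =>
            if ({ items := attrs } : PySem.Dict String String).contains k = true ∧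
                ({ items := attrs } : PySem.Dict String String).getD k "" ≠ "" then
              (st.1 ++ [k], st.2.add k) else st)
          (([], PySem.Set.empty) : List String × PySem.Set String)
          ["gene_id", "transcript_id", "gene_name", "product",
            "annotation_confidence"]).2.contains x = true ∧
          ({ items := attrs } : PySem.Dict String String).getD x "" ≠ "")
        = (decide (pvRank x = 5)
            && (({ items := attrs } : PySem.Dict String String).getD x "" != "")) := by
    intro k hk
    have hcont : ({ items := attrs } : PySem.Dict String String).contains k = true :=
      (contains_mk_iff attrs k).mpr hk
    have hseen : ∀ x : String,
        ((List.foldl (fun st k =>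
            if ({ items := attrs } : PySem.Dict String String).contains k = true ∧
                ({ items := attrs } : PySem.Dict String String).getD k "" ≠ "" then
              (st.1 ++ [k], st.2.add k) else st)
          (([], PySem.Set.empty) : List String × PySem.Set String)
          ["gene_id", "transcript_id", "gene_name", "product",
            "annotation_confidence"]).2.contains x) = true
          ↔ (x ∈ (["gene_id", "transcript_id", "gene_name", "product",
              "annotation_confidence"] : List String) ∧
             (({ items := attrs } : PySem.Dict String String).contains x = true ∧
              ({ items := attrs } : PySem.Dict String String).getD x "" ≠ "")) := by
      intro x
      rw [show ∀ s : PySem.Set String, s.contains x = List.contains s x from fun _ => rfl]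
      rw [List.contains_iff_mem, pairFold_snd_mem]
      simp [PySem.Set.empty]
    have hs := hseen k
    rw [Bool.eq_iff_iff]
    simp only [decide_eq_true_eq, Bool.and_eq_true, bne_iff_ne, hs, pvRank_five_iff]
    constructor
    · rintro ⟨hns, hvne⟩
      exact ⟨fun hp => hns ⟨hp, hcont, hvne⟩, hvne⟩
    · rintro ⟨hnp, hvne⟩
      exact ⟨fun h => hnp h.1, hvne⟩
  rw [List.filter_congr hpt]
  -- expand the six buckets and the five preferred filters
  simp only [List.flatMap_cons, List.flatMap_nil, List.append_nil]
  rw [chunk_pref attrs hnd "gene_id" 0 (fun k => pvRank_eq_iff k _ _ (by decide) (by decide)),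
      chunk_pref attrs hnd "transcript_id" 1 (fun k => pvRank_eq_iff k _ _ (by decide) (by decide)),
      chunk_pref attrs hnd "gene_name" 2 (fun k => pvRank_eq_iff k _ _ (by decide) (by decide)),
      chunk_pref attrs hnd "product" 3 (fun k => pvRank_eq_iff k _ _ (by decide) (by decide)),
      chunk_pref attrs hnd "annotation_confidence" 4 (fun k => pvRank_eq_iff k _ _ (by decide) (by decide))]
  rw [← List.filter_filter]
  simp only [List.filter_cons, List.filter_nil, List.nil_append, decide_eq_true_eq]
  split_ifs <;> simp

-- ===== VERDICT (by name: the statement is the Claim_ definition above) =====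
theorem format_gtf_attributes_spec : Claim_equal_format_gtf_attributes := by
  intro attrs _ hpre
  unfold Spec_format_gtf_attributes
  exact ports_eq attrs hpre
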